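-- pv_equiv track=rewrite | github.com/Akshaymuke/Data_Structures_and_Algorithms-Mastery | Arrays/max_no_of_matching_indices_after_right_shift.py | maximumMatchingIndices
-- ===== SOURCE A (Python) =====
-- def maximumMatchingIndices(nums1, nums2):
--     n = len(nums1)
--     max_cnt = 0
--     for num_of_shift in range(n):
--         curr_cnt = 0
--         for pos in range(n):
--             new_pos = (pos + num_of_shift) % n          # logic of shifting by ith position
--             if nums1[new_pos] == nums2[pos]:
--                 curr_cnt += 1
--         max_cnt = max(max_cnt,curr_cnt)
--     return max_cnt
-- ===== SOURCE B (Python) =====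
-- def maximumMatchingIndices(nums1, nums2):
--     n = len(nums1)
--     # group positions of nums1 by value
--     positions = {}
--     for j, v in enumerate(nums1):
--         positions.setdefault(v, []).append(j)
--     # for each matching pair (pos in nums2, j in nums1) credit the shift that aligns them
--     counts = {}
--     for pos in range(n):
--         for j in positions.get(nums2[pos], []):
--             s = (j - pos) % n
--             counts[s] = counts.get(s, 0) + 1
--     return max((counts.get(s, 0) for s in range(n)), default=0)
-- ===== Notes on version B (the rewrite author's own statement) =====
-- stated objective: faster
-- what changed: Instead of recomputing the match count for every shift with a nested scan, B groups nums1's positions by value in a dict and, for each position of nums2, credits only the shifts that actually align a matching pair, taking the max of the accumulated per-shift counts.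
import Mathlib
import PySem

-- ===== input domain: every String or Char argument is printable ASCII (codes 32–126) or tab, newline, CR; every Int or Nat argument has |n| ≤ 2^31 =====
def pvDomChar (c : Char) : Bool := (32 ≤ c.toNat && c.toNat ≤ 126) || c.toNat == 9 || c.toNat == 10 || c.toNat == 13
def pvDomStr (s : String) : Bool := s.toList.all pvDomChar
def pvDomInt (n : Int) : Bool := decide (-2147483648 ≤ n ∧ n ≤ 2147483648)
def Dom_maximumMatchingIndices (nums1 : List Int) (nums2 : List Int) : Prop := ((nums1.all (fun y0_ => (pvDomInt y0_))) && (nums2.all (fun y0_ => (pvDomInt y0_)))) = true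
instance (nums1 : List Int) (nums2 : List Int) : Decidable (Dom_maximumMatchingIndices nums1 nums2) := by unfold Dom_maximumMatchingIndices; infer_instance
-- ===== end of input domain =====

-- B replaces A's per-shift nested rescan by one pass that groups nums1's positions by value and
-- credits each matching (position, value) pair to the single shift aligning it (objective: faster).

-- ===== PORT A =====
-- all indices are in range on Pre_ (nums1.length ≤ nums2.length), so xs[i] is ported as pyGetD with an unused default
def maximumMatchingIndices (nums1 : List Int) (nums2 : List Int) : Int :=
  let n : Int := PySem.List.len nums1
  (PySem.List.pyRange 0 n).foldl (fun maxCnt numOfShift =>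
    let currCnt : Int :=
      (PySem.List.pyRange 0 n).foldl (fun currCnt pos =>
        let newPos := PySem.Int.mod (pos + numOfShift) n
        if PySem.List.pyGetD nums1 newPos 0 == PySem.List.pyGetD nums2 pos 0 then currCnt + 1
        else currCnt) 0
    max maxCnt currCnt) 0

-- ===== PORT B =====
-- literal port of Source B; nums2[pos] is in range on Pre_, ported as pyGetD with an unused default
def maximumMatchingIndices_alt (nums1 : List Int) (nums2 : List Int) : Int :=
  let n : Int := PySem.List.len nums1
  -- positions.setdefault(v, []).append(j)  ==  positions[v] = positions.get(v, []) + [j]  ==  Dict.modify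
  let positions : PySem.Dict Int (List Int) :=
    (PySem.List.enumerate nums1).foldl (fun d jv => d.modify jv.2 [] (· ++ [jv.1])) PySem.Dict.empty
  let counts : PySem.Dict Int Int :=
    (PySem.List.pyRange 0 n).foldl (fun d pos =>
      (positions.getD (PySem.List.pyGetD nums2 pos 0) []).foldl (fun d j =>
        let s := PySem.Int.mod (j - pos) n
        d.insert s (d.getD s 0 + 1)) d) PySem.Dict.empty
  PySem.List.maxD ((PySem.List.pyRange 0 n).map (fun s => counts.getD s 0)) (fun x => x) 0

-- ===== PRECONDITION & SPEC =====
-- Pre_ excludes exactly the inputs where the Python A raises IndexError: nums2 shorter than nums1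
def Pre_maximumMatchingIndices (nums1 : List Int) (nums2 : List Int) : Prop :=
  nums1.length ≤ nums2.length
instance (nums1 : List Int) (nums2 : List Int) : Decidable (Pre_maximumMatchingIndices nums1 nums2) := by unfold Pre_maximumMatchingIndices; infer_instance
def pvWitness_maximumMatchingIndices : List Int × List Int := ([1, 2, 3], [3, 1, 2])

def Spec_maximumMatchingIndices (nums1 : List Int) (nums2 : List Int) (out : Int) : Prop := out = maximumMatchingIndices_alt nums1 nums2
instance (nums1 : List Int) (nums2 : List Int) (out : Int) : Decidable (Spec_maximumMatchingIndices nums1 nums2 out) := by unfold Spec_maximumMatchingIndices; infer_instance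

-- ===== CLAIM (what is proved, stated in full; the proofs are below) =====
def Claim_equal_maximumMatchingIndices : Prop := ∀ (nums1 : List Int) (nums2 : List Int), Dom_maximumMatchingIndices nums1 nums2 → Pre_maximumMatchingIndices nums1 nums2 → Spec_maximumMatchingIndices nums1 nums2 (maximumMatchingIndices nums1 nums2)

-- ===== LEMMAS AND PROOFS =====

-- a 0/1 Nat sum is a count
theorem pvSumIte (l : List Int) (p : Int → Bool) :
    (l.map (fun x => if p x then (1 : Nat) else 0)).sum = l.countP p := by
  induction l with
  | nil => rfl
  | cons a t ih =>
    simp only [List.map_cons, List.sum_cons, List.countP_cons, ih]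
    by_cases h : p a
    · simp [h]
      omega
    · simp [h]

-- counting "j = j0 and q j" on a Nodup list containing j0
theorem pvCountPick (l : List Int) (hnd : l.Nodup) (j0 : Int) (hj0 : j0 ∈ l) (q : Int → Bool) :
    l.countP (fun j => (j == j0) && q j) = if q j0 then 1 else 0 := by
  have hpt : ∀ j ∈ l, ((j == j0) && q j) = ((j == j0) && q j0) := by
    intro j _
    by_cases h : j = j0
    · subst h; rfl
    · have hb : (j == j0) = false := by simpa using h
      simp [hb]
  rw [List.countP_congr (fun x hx => by rw [hpt x hx])]
  by_cases hq : q j0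
  · simp only [hq, Bool.and_true]
    simpa [List.count] using List.count_eq_one_of_mem hnd hj0
  · simp [hq]

-- the modular-shift bijection: for j in [0,N), (j - pos) % N = s  iff  j = (pos + s) % N
theorem pvModIff (N pos s j : Int) (hN : 0 < N) (hs0 : 0 ≤ s) (hsN : s < N)
    (hj0 : 0 ≤ j) (hjN : j < N) :
    (PySem.Int.mod (j - pos) N == s) = (j == PySem.Int.mod (pos + s) N) := by
  rw [PySem.Int.mod_eq_emod_of_pos hN, PySem.Int.mod_eq_emod_of_pos hN]
  have hjj : j % N = j := Int.emod_eq_of_lt hj0 hjN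
  have hss : s % N = s := Int.emod_eq_of_lt hs0 hsN
  have key : ((j - pos) % N = s) ↔ (j = (pos + s) % N) := by
    constructor
    · intro h
      have : (pos + s) % N = (pos + (j - pos) % N) % N := by rw [h]
      rw [Int.add_emod pos ((j - pos) % N) N, Int.emod_emod_of_dvd _ dvd_rfl,
          ← Int.add_emod, add_sub_cancel, hjj] at this
      omega
    · intro h
      subst h
      rw [Int.sub_emod, Int.emod_emod_of_dvd _ dvd_rfl, ← Int.sub_emod,
          add_sub_cancel_left, hss]
  rw [Bool.eq_iff_iff]
  simpa [beq_iff_eq] using key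

-- the grouping dict of B, characterised: positions[v] is the list of indices of nums1 holding v
theorem pvPositions (nums1 : List Int) (v : Int) :
    (((PySem.List.enumerate nums1).foldl
        (fun d jv => d.modify jv.2 [] (· ++ [jv.1])) PySem.Dict.empty).getD v [])
      = (((PySem.List.enumerate nums1).filter (fun q => q.2 == v)).map (fun q => q.1)) := by
  have h := PySem.Dict.getD_foldl_modify_append
      ((PySem.List.enumerate nums1).map Prod.swap) (PySem.Dict.empty (κ := Int) (ν := List Int)) v
  rw [List.foldl_map] at h
  simpa [PySem.Dict.getD_empty, List.filter_map, List.map_map, Function.comp, Prod.swap] using h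

-- the inner per-value loop of B rewritten as a fold over the generated shift keys
theorem pvInnerFold (posL : List Int) (pos N : Int) (d : PySem.Dict Int Int) :
    posL.foldl (fun d j =>
        d.insert (PySem.Int.mod (j - pos) N) (d.getD (PySem.Int.mod (j - pos) N) 0 + 1)) d
      = (posL.map (fun j => PySem.Int.mod (j - pos) N)).foldl
          (fun d k => d.insert k (d.getD k 0 + 1)) d := by
  rw [List.foldl_map]

-- max with default 0 of a list of nonnegative numbers is the running max from 0
theorem pvMaxD (xs : List Int) (h : ∀ x ∈ xs, 0 ≤ x) :
    PySem.List.maxD xs (fun x => x) 0 = xs.foldl max 0 := by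
  cases xs with
  | nil => rfl
  | cons x t =>
    have hx : (0 : Int) ≤ x := h x (by simp)
    rw [PySem.List.maxD, PySem.List.max?_id_cons]
    simp [List.foldl_cons, max_eq_right hx]

-- the per-shift match count both programs compute
theorem pvCore (nums1 nums2 : List Int) (s : Int)
    (hs : s ∈ PySem.List.pyRange 0 (PySem.List.len nums1)) :
    (((PySem.List.pyRange 0 (PySem.List.len nums1)).flatMap (fun pos =>
        (((PySem.List.enumerate nums1).foldl
            (fun d jv => d.modify jv.2 [] (· ++ [jv.1])) PySem.Dict.empty).getD
              (PySem.List.pyGetD nums2 pos 0) []).map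
          (fun j => PySem.Int.mod (j - pos) (PySem.List.len nums1)))).count s)
      = ((PySem.List.pyRange 0 (PySem.List.len nums1)).countP (fun pos =>
          PySem.List.pyGetD nums1 (PySem.Int.mod (pos + s) (PySem.List.len nums1)) 0
            == PySem.List.pyGetD nums2 pos 0)) := by
  set N : Int := PySem.List.len nums1 with hNdef
  obtain ⟨hs0, hsN⟩ := PySem.List.mem_pyRange_one.mp hs
  have hN : 0 < N := lt_of_le_of_lt hs0 hsN
  rw [List.count_flatMap]
  simp only [Function.comp_def]
  have hper : ∀ pos ∈ PySem.List.pyRange 0 N,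
      (List.count s
        ((((PySem.List.enumerate nums1).foldl
            (fun d jv => d.modify jv.2 [] (· ++ [jv.1]))
            (PySem.Dict.empty : PySem.Dict Int (List Int))).getD
              (PySem.List.pyGetD nums2 pos 0) []).map
          (fun j => PySem.Int.mod (j - pos) N)))
      = if PySem.List.pyGetD nums1 (PySem.Int.mod (pos + s) N) 0
            == PySem.List.pyGetD nums2 pos 0 then 1 else 0 := by
    intro pos _
    rw [pvPositions nums1 (PySem.List.pyGetD nums2 pos 0)]
    rw [PySem.List.enumerate_eq_map_pyRange nums1 0]
    rw [List.count_eq_countP, List.countP_map, List.countP_map, List.countP_filter,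
        List.countP_map]
    simp only [Function.comp_def, ← hNdef]
    -- rewrite the predicate pointwise on the range
    have hcg : ∀ j ∈ PySem.List.pyRange 0 N,
        ((PySem.Int.mod (j - pos) N == s) &&
          (PySem.List.pyGetD nums1 j 0 == PySem.List.pyGetD nums2 pos 0))
        = ((j == PySem.Int.mod (pos + s) N) &&
          (PySem.List.pyGetD nums1 j 0 == PySem.List.pyGetD nums2 pos 0)) := by
      intro j hj
      obtain ⟨hj0, hjN⟩ := PySem.List.mem_pyRange_one.mp hj
      rw [pvModIff N pos s j hN hs0 hsN hj0 hjN]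
    calc ((PySem.List.pyRange 0 N).countP fun j =>
            ((PySem.Int.mod (j - pos) N == s) &&
              (PySem.List.pyGetD nums1 j 0 == PySem.List.pyGetD nums2 pos 0)))
        = (PySem.List.pyRange 0 N).countP (fun j =>
            ((j == PySem.Int.mod (pos + s) N) &&
              (PySem.List.pyGetD nums1 j 0 == PySem.List.pyGetD nums2 pos 0))) := by
          exact List.countP_congr (fun x hx => by rw [hcg x hx])
      _ = _ := by
          apply pvCountPick _ (PySem.List.nodup_pyRange_one 0 N)
          exact PySem.List.mem_pyRange_one.mpr
            ⟨PySem.Int.mod_nonneg _ hN, PySem.Int.mod_lt _ hN⟩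
  rw [List.map_congr_left hper, pvSumIte]

-- ===== VERDICT (by name: the statement is the Claim_ definition above) =====
theorem maximumMatchingIndices_spec : Claim_equal_maximumMatchingIndices := by
  intro nums1 nums2 _ _
  unfold Spec_maximumMatchingIndices
  simp only [maximumMatchingIndices, maximumMatchingIndices_alt]
  -- A's inner loop is a countP
  simp only [PySem.List.foldl_if_add_one, zero_add]
  -- B's nested counting loop is a counting fold over the flattened key list
  have h1 : ((PySem.List.pyRange 0 (PySem.List.len nums1)).foldl (fun d pos =>
        ((((PySem.List.enumerate nums1).foldl
            (fun d jv => d.modify jv.2 [] (· ++ [jv.1]))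
            (PySem.Dict.empty : PySem.Dict Int (List Int))).getD
              (PySem.List.pyGetD nums2 pos 0) []).foldl (fun d j =>
          d.insert (PySem.Int.mod (j - pos) (PySem.List.len nums1))
            ((d.getD (PySem.Int.mod (j - pos) (PySem.List.len nums1)) 0) + 1)) d))
        (PySem.Dict.empty : PySem.Dict Int Int))
      = (((PySem.List.pyRange 0 (PySem.List.len nums1)).flatMap (fun pos =>
          ((((PySem.List.enumerate nums1).foldl
              (fun d jv => d.modify jv.2 [] (· ++ [jv.1]))
              (PySem.Dict.empty : PySem.Dict Int (List Int))).getD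
                (PySem.List.pyGetD nums2 pos 0) []).map
            (fun j => PySem.Int.mod (j - pos) (PySem.List.len nums1))))).foldl
          (fun d k => d.insert k (d.getD k 0 + 1)) PySem.Dict.empty) := by
    rw [List.foldl_flatMap]
    exact PySem.List.foldl_congr_mem _ _ _ _ (fun acc pos _ => pvInnerFold _ pos _ acc)
  simp only [h1]
  -- look up each shift's accumulated count
  simp only [PySem.Dict.getD_foldl_insert_add_one, PySem.Dict.getD_empty, zero_add]
  -- per shift, B's count equals A's count
  have h2 := List.map_congr_left (l := PySem.List.pyRange 0 (PySem.List.len nums1))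
    (fun s hs => congrArg (fun n : Nat => (n : Int)) (pvCore nums1 nums2 s hs))
  rw [h2]
  -- max with default 0 over nonnegative counts is A's running max
  rw [pvMaxD _ (by
    intro x hx
    obtain ⟨s, _, rfl⟩ := List.mem_map.mp hx
    exact Int.natCast_nonneg _)]
  rw [List.foldl_map]
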